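-- pv_equiv track=rewrite | github.com/luizacbcampos/LearningFromThePros | auxi.py | remove_left_right
-- ===== SOURCE A (Python) =====
-- def remove_left_right(d):
-- 	def invert_dict(d):
-- 	    inverse = dict()
-- 	    for key in d: # Go through the list that is saved in the dict:
-- 	        for item in d[key]: # Check if in the inverted dict the key exists
-- 	            if item not in inverse: # If not create a new list
-- 	                inverse[item] = [key]
-- 	            else:
-- 	                inverse[item].append(key)
-- 	    return inverse
--
-- 	og = ['Aggressive Set', 'Passive Set', 'Spread', 'Smother']
-- 	dicio = {k: [v] for k,v in d.items()}
--
-- 	inverse = invert_dict(dicio)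
-- 	for k,v in inverse.items():
-- 		if len(v) > 1:
-- 			new_list = set([g.split(" Left")[0].split(' Right')[0] for g in v])
-- 			if len(new_list) == 1:
-- 				inverse[k] = list(new_list)
--
-- 	inverse = invert_dict(inverse)
-- 	dicio = {k:v[0] for k,v in inverse.items()}
-- 	return dicio
-- ===== SOURCE B (Python) =====
-- def remove_left_right(d):
--     # No dict inversion and no dict-of-lists: for each distinct value (first-occurrence
--     # order) scan the items once to collect its keys, collapse " Left"/" Right"
--     # variants when all stripped bases agree, and emit first-wins into the result.
--     items = list(d.items())
--     result = {}
--     for value in dict.fromkeys(v for _, v in items):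
--         keys = [k for k, u in items if u == value]
--         if len(keys) > 1:
--             bases = {k.split(" Left")[0].split(' Right')[0] for k in keys}
--             if len(bases) == 1:
--                 keys = list(bases)
--         for k in keys:
--             if k not in result:
--                 result[k] = value
--     return result
-- ===== Notes on version B (the rewrite author's own statement) =====
-- stated objective: alternative
-- what changed: B builds no intermediate dict at all: instead of A's box-values-into-lists, invert-dict helper, in-place collapse and second full inversion, B iterates the distinct values (dict.fromkeys order) and for each one filters the items list for its keys, collapses the Left/Right variants inline, and emits first-wins into the result.
import Mathlib
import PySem

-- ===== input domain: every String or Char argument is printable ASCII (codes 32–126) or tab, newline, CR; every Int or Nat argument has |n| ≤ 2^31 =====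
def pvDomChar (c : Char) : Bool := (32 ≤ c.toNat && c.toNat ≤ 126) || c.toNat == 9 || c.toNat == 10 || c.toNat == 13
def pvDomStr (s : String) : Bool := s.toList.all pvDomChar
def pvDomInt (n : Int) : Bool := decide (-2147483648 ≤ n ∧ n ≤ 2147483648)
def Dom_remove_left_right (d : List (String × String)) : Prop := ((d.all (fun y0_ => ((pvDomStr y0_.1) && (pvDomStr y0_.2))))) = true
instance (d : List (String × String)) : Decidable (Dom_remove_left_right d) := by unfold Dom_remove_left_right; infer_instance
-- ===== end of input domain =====

-- B drops both dict inversions and the dict-of-lists: it scans the items once per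
-- distinct value to collect that value's keys and emits directly; objective: alternative.

-- ===== PORT A =====
-- g.split(" Left")[0].split(' Right')[0] — split? is `some` (separator nonempty) and the
-- result is nonempty, so getD/pyGetD are exact here
def pvBase (g : String) : String :=
  PySem.List.pyGetD
    ((PySem.Str.split? (PySem.List.pyGetD ((PySem.Str.split? g " Left").getD []) 0 "") " Right").getD [])
    0 ""

-- A's inner helper invert_dict
def pvInvert (dd : PySem.Dict String (List String)) : PySem.Dict String (List String) :=
  dd.items.foldl (fun inv kv =>
    kv.2.foldl (fun inv item =>
      if inv.contains item then inv.modify item [] (fun l => l ++ [kv.1])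
      else inv.insert item [kv.1]) inv) PySem.Dict.empty

def remove_left_right (d : List (String × String)) : List (String × String) :=
  let dicio := PySem.Dict.ofList ((PySem.Dict.ofList d).items.map (fun p => (p.1, [p.2])))
  let inv1 := pvInvert dicio
  let inv2 := inv1.items.foldl (fun inv kv =>
      if 1 < PySem.List.len kv.2 then
        let new_list := PySem.Set.ofList (kv.2.map pvBase)
        if PySem.Set.len new_list = 1 then inv.insert kv.1 new_list else inv
      else inv) inv1
  let inv3 := pvInvert inv2
  (PySem.Dict.ofList (inv3.items.map (fun kv => (kv.1, PySem.List.pyGetD kv.2 0 "")))).items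

-- ===== PORT B =====
def remove_left_right_alt (d : List (String × String)) : List (String × String) :=
  let items := (PySem.Dict.ofList d).items
  -- dict.fromkeys over the values = ordered dedup
  (((PySem.List.dedup (items.map Prod.snd)).foldl (fun res value =>
      let keys := (items.filter (fun p => p.2 == value)).map Prod.fst
      let keys := if 1 < PySem.List.len keys then
          let bases := PySem.Set.ofList (keys.map pvBase)
          if PySem.Set.len bases = 1 then bases else keys
        else keys
      keys.foldl (fun res k => if res.contains k then res else res.insert k value) res)
    PySem.Dict.empty) : PySem.Dict String String).items

-- ===== PRECONDITION & SPEC =====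
def Spec_remove_left_right (d : List (String × String)) (out : List (String × String)) : Prop := out = remove_left_right_alt d
instance (d : List (String × String)) (out : List (String × String)) : Decidable (Spec_remove_left_right d out) := by unfold Spec_remove_left_right; infer_instance

-- ===== CLAIM (what is proved, stated in full; the proofs are below) =====
def Claim_equal_remove_left_right : Prop := ∀ (d : List (String × String)), Dom_remove_left_right d → Spec_remove_left_right d (remove_left_right d)

-- ===== LEMMAS AND PROOFS =====

-- B's per-group collapse step, named for the proofs below
def pvCollapse (keys : List String) : List String :=
  if 1 < PySem.List.len keys then
    let bases := PySem.Set.ofList (keys.map pvBase)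
    if PySem.Set.len bases = 1 then bases else keys
  else keys

-- a dict built from an association list with distinct keys has exactly that items list
lemma pv_ofList_items {ν : Type} (l : List (String × ν)) (h : (l.map Prod.fst).Nodup) :
    (PySem.Dict.ofList l).items = l := by
  have := PySem.Dict.items_foldl_insert_fresh l Prod.fst Prod.snd PySem.Dict.empty
    (fun a _ => by simp) h
  simpa [PySem.Dict.ofList, PySem.Dict.update] using this

-- inserting at a key the dict already holds rewrites that entry in place
lemma pv_insert_mid {ν : Type} (pre l : List (String × ν)) (k : String) (v w : ν)
    (dd : PySem.Dict String ν) (hit : dd.items = pre ++ (k, v) :: l) (hnd : dd.keys.Nodup) :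
    (dd.insert k w).items = pre ++ (k, w) :: l := by
  have hc : dd.contains k = true := by
    rw [PySem.Dict.contains_iff_mem_keys]
    simp [PySem.Dict.keys, hit]
  have hnd' : ((pre ++ (k, v) :: l).map Prod.fst).Nodup := by
    have : dd.keys = (pre ++ (k, v) :: l).map Prod.fst := by simp [PySem.Dict.keys, hit]
    rwa [this] at hnd
  rw [List.map_append, List.map_cons, List.nodup_append] at hnd'
  obtain ⟨-, hc2, hdisj⟩ := hnd'
  rw [List.nodup_cons] at hc2
  have hpre : ∀ p ∈ pre, (p.1 == k) = false := by
    intro p hp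
    have : p.1 ≠ k := by
      intro e
      exact hdisj p.1 (List.mem_map.mpr ⟨p, hp, rfl⟩) k (List.mem_cons_self ..) e
    simpa using this
  have hl : ∀ p ∈ l, (p.1 == k) = false := by
    intro p hp
    have : p.1 ≠ k := by
      intro e
      exact hc2.1 (by rw [← e]; exact List.mem_map.mpr ⟨p, hp, rfl⟩)
    simpa using this
  rw [PySem.Dict.items_insert_of_contains _ _ hc, hit, List.map_append, List.map_cons]
  congr 1
  · calc pre.map (fun p => if (p.1 == k) = true then (k, w) else p)
        = pre.map id := List.map_congr_left (fun p hp => by simp [hpre p hp])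
      _ = pre := List.map_id _
  · simp only [beq_self_eq_true, if_pos]
    congr 1
    calc l.map (fun p => if (p.1 == k) = true then (k, w) else p)
        = l.map id := List.map_congr_left (fun p hp => by simp [hl p hp])
      _ = l := List.map_id _

-- A's in-place collapse loop maps pvCollapse over the values
lemma pv_collapse_items : ∀ (l pre : List (String × List String)) (dd : PySem.Dict String (List String)),
    dd.items = pre ++ l → dd.keys.Nodup →
    (l.foldl (fun inv kv =>
      if 1 < PySem.List.len kv.2 then
        let new_list := PySem.Set.ofList (kv.2.map pvBase)
        if PySem.Set.len new_list = 1 then inv.insert kv.1 new_list else inv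
      else inv) dd).items = pre ++ l.map (fun kv => (kv.1, pvCollapse kv.2)) := by
  intro l
  induction l with
  | nil => intro pre dd hit _; simpa using hit
  | cons kv l ih =>
    intro pre dd hit hnd
    obtain ⟨k, v⟩ := kv
    rw [List.foldl_cons]
    by_cases h1 : 1 < v.length
    · by_cases h2 : (PySem.Set.ofList (v.map pvBase)).length = 1
      · have hstep : (if 1 < PySem.List.len v then
            let new_list := PySem.Set.ofList (v.map pvBase)
            if PySem.Set.len new_list = 1 then dd.insert k new_list else dd
          else dd) = dd.insert k (PySem.Set.ofList (v.map pvBase)) := by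
          simp [PySem.Set.len, h1, h2]
        have hcol : pvCollapse v = PySem.Set.ofList (v.map pvBase) := by
          simp [pvCollapse, PySem.Set.len, h1, h2]
        rw [hstep]
        have hit' := pv_insert_mid pre l k v (PySem.Set.ofList (v.map pvBase)) dd hit hnd
        have hnd' : (dd.insert k (PySem.Set.ofList (v.map pvBase))).keys.Nodup := by
          have : (dd.insert k (PySem.Set.ofList (v.map pvBase))).keys = dd.keys := by
            simp [PySem.Dict.keys, hit', hit]
          rwa [this]
        have := ih (pre ++ [(k, PySem.Set.ofList (v.map pvBase))]) _
          (by rw [hit']; simp) hnd'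
        rw [this, List.append_assoc]
        simp [hcol]
      · have hstep : (if 1 < PySem.List.len v then
            let new_list := PySem.Set.ofList (v.map pvBase)
            if PySem.Set.len new_list = 1 then dd.insert k new_list else dd
          else dd) = dd := by simp [PySem.Set.len, h1, h2]
        have hcol : pvCollapse v = v := by simp [pvCollapse, PySem.Set.len, h1, h2]
        rw [hstep]
        have := ih (pre ++ [(k, v)]) dd (by rw [hit]; simp) hnd
        rw [this, List.append_assoc]
        simp [hcol]
    · have hstep : (if 1 < PySem.List.len v then
          let new_list := PySem.Set.ofList (v.map pvBase)
          if PySem.Set.len new_list = 1 then dd.insert k new_list else dd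
        else dd) = dd := by simp [h1]
      have hcol : pvCollapse v = v := by simp [pvCollapse, h1]
      rw [hstep]
      have := ih (pre ++ [(k, v)]) dd (by rw [hit]; simp) hnd
      rw [this, List.append_assoc]
      simp [hcol]

-- a nested fold over (value, keys) groups is a fold over the flattened (key, value) pairs
lemma pv_foldl_nested {γ : Type} (l : List (String × List String)) (g : String × List String → List String)
    (f : γ → String → String → γ) (init : γ) :
    l.foldl (fun acc kv => (g kv).foldl (fun a k => f a k kv.1) acc) init
      = (l.flatMap (fun kv => (g kv).map (fun k => (k, kv.1)))).foldl (fun a p => f a p.1 p.2) init := by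
  induction l generalizing init with
  | nil => rfl
  | cons kv l ih => simp [List.foldl_append, List.foldl_map, ih]

-- A's second inversion keeps its keys distinct
lemma pv_inv_nodup : ∀ (ps : List (String × String)) (dA : PySem.Dict String (List String)),
    dA.keys.Nodup →
    ((ps.foldl (fun inv p =>
       if inv.contains p.1 then inv.modify p.1 [] (fun l => l ++ [p.2])
       else inv.insert p.1 [p.2]) dA)).keys.Nodup := by
  intro ps
  induction ps with
  | nil => intro dA h; exact h
  | cons p ps ih =>
    intro dA h
    rw [List.foldl_cons]
    by_cases hc : dA.contains p.1 = true
    · rw [if_pos hc]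
      apply ih
      have : (dA.modify p.1 [] (fun l => l ++ [p.2])).keys = dA.keys := by
        rw [PySem.Dict.keys_modify, PySem.Dict.keys_insert_of_contains _ _ hc]
      rwa [this]
    · rw [if_neg hc]
      apply ih
      have hcf : dA.contains p.1 = false := by simpa using hc
      rw [PySem.Dict.keys_insert_of_not_contains _ _ hcf]
      have hk : p.1 ∉ dA.keys := fun hh => hc ((PySem.Dict.contains_iff_mem_keys _ _).mpr hh)
      simp [List.nodup_append, h]
      exact fun a ha e => hk (e ▸ ha)

-- B's direct emission equals A's second inversion followed by taking each value list's head
lemma pv_emit_eq_invert : ∀ (ps : List (String × String)) (dA : PySem.Dict String (List String))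
    (dB : PySem.Dict String String),
    dA.keys.Nodup →
    dB.items = dA.items.map (fun kv => (kv.1, PySem.List.pyGetD kv.2 0 "")) →
    (∀ kv ∈ dA.items, kv.2 ≠ []) →
    (ps.foldl (fun res p => if res.contains p.1 then res else res.insert p.1 p.2) dB).items
      = (ps.foldl (fun inv p =>
          if inv.contains p.1 then inv.modify p.1 [] (fun l => l ++ [p.2])
          else inv.insert p.1 [p.2]) dA).items.map (fun kv => (kv.1, PySem.List.pyGetD kv.2 0 "")) := by
  intro ps
  induction ps with
  | nil => intro dA dB _ hBA _; exact hBA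
  | cons p ps ih =>
    intro dA dB hnd hBA hne
    obtain ⟨k, v⟩ := p
    have hkeys : dB.keys = dA.keys := by
      simp [PySem.Dict.keys, hBA, List.map_map, Function.comp]
    have hcont : dB.contains k = dA.contains k := by
      rw [PySem.Dict.contains_eq_decide_mem_keys, PySem.Dict.contains_eq_decide_mem_keys, hkeys]
    rw [List.foldl_cons, List.foldl_cons]
    by_cases h : dA.contains k = true
    · rw [if_pos (by rw [hcont]; exact h), if_pos h]
      have hk : k ∈ dA.keys := (PySem.Dict.contains_iff_mem_keys _ _).mp h
      have : ∃ q ∈ dA.items, q.1 = k := by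
        simpa [PySem.Dict.keys, List.mem_map] using hk
      obtain ⟨⟨k', v0⟩, hmem, hk'⟩ := this
      subst hk'
      obtain ⟨pre, l, hsplit⟩ := List.append_of_mem hmem
      have hg : dA.getD k' [] = v0 := PySem.Dict.getD_of_mem_items _ hmem hnd []
      have hmod : (dA.modify k' [] (fun l => l ++ [v])).items = pre ++ (k', v0 ++ [v]) :: l := by
        show (dA.insert k' ((dA.getD k' []) ++ [v])).items = _
        rw [hg]
        exact pv_insert_mid pre l k' v0 (v0 ++ [v]) dA hsplit hnd
      have hv0 : v0 ≠ [] := hne _ hmem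
      apply ih
      · have : (dA.modify k' [] (fun l => l ++ [v])).keys = dA.keys := by
          simp [PySem.Dict.keys, hmod, hsplit]
        rwa [this]
      · rw [hmod, hBA, hsplit]
        simp only [List.map_append, List.map_cons]
        congr 2
        cases v0 with
        | nil => exact absurd rfl hv0
        | cons a t => simp [PySem.List.pyGetD_zero]
      · intro kv hkv
        rw [hmod] at hkv
        rcases List.mem_append.mp hkv with hkv | hkv
        · exact hne _ (by rw [hsplit]; exact List.mem_append_left _ hkv)
        · rcases List.mem_cons.mp hkv with rfl | hkv
          · simp
          · exact hne _ (by rw [hsplit]; exact List.mem_append_right _ (List.mem_cons_of_mem _ hkv))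
    · have hcf : dA.contains k = false := by simpa using h
      have hcfB : dB.contains k = false := by rw [hcont]; exact hcf
      rw [if_neg (by rw [hcont]; exact h), if_neg h]
      apply ih
      · rw [PySem.Dict.keys_insert_of_not_contains _ _ hcf]
        have hk : k ∉ dA.keys := fun hh => h ((PySem.Dict.contains_iff_mem_keys _ _).mpr hh)
        simp [List.nodup_append, hnd]
        exact fun a ha e => hk (e ▸ ha)
      · rw [PySem.Dict.items_insert_of_not_contains _ _ hcfB,
            PySem.Dict.items_insert_of_not_contains _ _ hcf, hBA]
        simp [PySem.List.pyGetD_zero]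
      · intro kv hkv
        rw [PySem.Dict.items_insert_of_not_contains _ _ hcf] at hkv
        rcases List.mem_append.mp hkv with hkv | hkv
        · exact hne _ hkv
        · simp at hkv
          subst hkv
          simp

-- the grouping fold's items, characterised by distinct values and filters
lemma pv_groups_char (items : List (String × String)) :
    ((items.foldl (fun g kv => g.modify kv.2 [] (fun l => l ++ [kv.1]))
        (PySem.Dict.empty : PySem.Dict String (List String)))).items
      = (PySem.Set.ofList (items.map Prod.snd)).map
          (fun v => (v, (items.filter (fun p => p.2 == v)).map Prod.fst)) := by
  set G := items.foldl (fun g kv => g.modify kv.2 [] (fun l => l ++ [kv.1]))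
      (PySem.Dict.empty : PySem.Dict String (List String)) with hG
  have hkeys : G.keys = PySem.Set.ofList (items.map Prod.snd) := by
    rw [hG]
    have := PySem.Dict.keys_foldl_modify_key items (fun kv : String × String => kv.2) ([] : List String)
      (fun (_ : PySem.Dict String (List String)) (kv : String × String) => (fun l => l ++ [kv.1]))
      (PySem.Dict.empty)
    rw [this]
    simp [PySem.Dict.keys_empty, PySem.Set.update]
    rfl
  have hnd : G.keys.Nodup := by
    rw [hkeys]
    exact PySem.Set.nodup_ofList _
  have hgetD : ∀ v, G.getD v [] = (items.filter (fun p => p.2 == v)).map Prod.fst := by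
    intro v
    have hswap : G = (items.map (fun p => (p.2, p.1))).foldl
        (fun g p => g.modify p.1 [] (fun l => l ++ [p.2])) PySem.Dict.empty := by
      rw [hG, List.foldl_map]
    rw [hswap, PySem.Dict.getD_foldl_modify_append]
    simp only [PySem.Dict.getD_empty, List.filter_map, List.map_map, Function.comp_def, List.nil_append]
  rw [PySem.Dict.items_eq_map_keys G hnd ([] : List String), hkeys]
  exact List.map_congr_left (fun v _ => by rw [hgetD v])

-- ===== VERDICT (by name: the statement is the Claim_ definition above) =====
theorem remove_left_right_spec : Claim_equal_remove_left_right := by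
  intro d _
  unfold Spec_remove_left_right
  simp only [remove_left_right, remove_left_right_alt]
  have hbnd : (PySem.Dict.ofList d).keys.Nodup := PySem.Dict.nodup_keys_ofList d
  -- A's dict comprehension {k: [v]} keeps the input dict's items, with each value boxed
  have hdicio : (PySem.Dict.ofList ((PySem.Dict.ofList d).items.map
      (fun p => (p.1, ([p.2] : List String))))).items
      = (PySem.Dict.ofList d).items.map (fun p => (p.1, ([p.2] : List String))) := by
    apply pv_ofList_items
    have : ((PySem.Dict.ofList d).items.map
        (fun p : String × String => (p.1, ([p.2] : List String)))).map Prod.fst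
        = (PySem.Dict.ofList d).keys := by
      simp [PySem.Dict.keys, List.map_map, Function.comp]
    rw [this]
    exact hbnd
  -- A's first inversion of the boxed dict is a value-keyed grouping fold
  have hinv1 : pvInvert (PySem.Dict.ofList ((PySem.Dict.ofList d).items.map
      (fun p => (p.1, ([p.2] : List String)))))
      = (PySem.Dict.ofList d).items.foldl
          (fun g kv => g.modify kv.2 [] (fun l => l ++ [kv.1])) PySem.Dict.empty := by
    unfold pvInvert
    rw [hdicio, List.foldl_map]
    congr 1
    funext inv p
    simp only [List.foldl_cons, List.foldl_nil]
    by_cases h : inv.contains p.2 = true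
    · rw [if_pos h]
    · rw [if_neg h]
      show inv.insert p.2 [p.1] = inv.insert p.2 ((inv.getD p.2 []) ++ [p.1])
      rw [PySem.Dict.getD_of_not_contains _ _ (by simpa using h)]
      rfl
  rw [hinv1]
  set groups := (PySem.Dict.ofList d).items.foldl
      (fun g kv => g.modify kv.2 [] (fun l => l ++ [kv.1])) PySem.Dict.empty with hg
  have hgnd : groups.keys.Nodup := by
    rw [hg]
    exact PySem.Dict.nodup_keys_foldl_modify_key (PySem.Dict.ofList d).items
      (fun kv : String × String => kv.2) []
      (fun (_ : PySem.Dict String (List String)) (kv : String × String) => (fun l => l ++ [kv.1]))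
      PySem.Dict.empty PySem.Dict.nodup_keys_empty
  have hinv2 : ((groups.items.foldl (fun inv kv =>
      if 1 < PySem.List.len kv.2 then
        let new_list := PySem.Set.ofList (kv.2.map pvBase)
        if PySem.Set.len new_list = 1 then inv.insert kv.1 new_list else inv
      else inv) groups)).items
      = groups.items.map (fun kv => (kv.1, pvCollapse kv.2)) :=
    pv_collapse_items groups.items [] groups (by simp) hgnd
  set inv2 := groups.items.foldl (fun inv kv =>
      if 1 < PySem.List.len kv.2 then
        let new_list := PySem.Set.ofList (kv.2.map pvBase)
        if PySem.Set.len new_list = 1 then inv.insert kv.1 new_list else inv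
      else inv) groups with hi2
  -- flatten A's second inversion
  have h3 : pvInvert inv2
      = (inv2.items.flatMap (fun kv => kv.2.map (fun k => (k, kv.1)))).foldl
          (fun inv p => if inv.contains p.1 then inv.modify p.1 [] (fun l => l ++ [p.2])
           else inv.insert p.1 [p.2]) PySem.Dict.empty := by
    unfold pvInvert
    exact pv_foldl_nested inv2.items (fun kv => kv.2)
      (fun a k v => if a.contains k then a.modify k [] (fun l => l ++ [v]) else a.insert k [v])
      PySem.Dict.empty
  -- B's fold over distinct values is a fold over groups.items (pv_groups_char), then flattened
  have hchar : groups.items = (PySem.Set.ofList ((PySem.Dict.ofList d).items.map Prod.snd)).map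
      (fun v => (v, ((PySem.Dict.ofList d).items.filter (fun p => p.2 == v)).map Prod.fst)) := by
    rw [hg]
    exact pv_groups_char (PySem.Dict.ofList d).items
  have hBfold : ((PySem.List.dedup ((PySem.Dict.ofList d).items.map Prod.snd)).foldl
      (fun res value =>
        let keys := (((PySem.Dict.ofList d).items.filter (fun p => p.2 == value)).map Prod.fst)
        let keys := if 1 < PySem.List.len keys then
            let bases := PySem.Set.ofList (keys.map pvBase)
            if PySem.Set.len bases = 1 then bases else keys
          else keys
        keys.foldl (fun res k => if res.contains k then res else res.insert k value) res)
      (PySem.Dict.empty : PySem.Dict String String))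
      = groups.items.foldl (fun res kv =>
          (pvCollapse kv.2).foldl (fun res k =>
            if res.contains k then res else res.insert k kv.1) res) PySem.Dict.empty := by
    rw [hchar, List.foldl_map, PySem.List.dedup_eq_ofList]
    rfl
  have hB : (groups.items.foldl (fun res kv =>
        (pvCollapse kv.2).foldl (fun res k =>
          if res.contains k then res else res.insert k kv.1) res) PySem.Dict.empty)
      = (groups.items.flatMap (fun kv => (pvCollapse kv.2).map (fun k => (k, kv.1)))).foldl
          (fun res p => if res.contains p.1 then res else res.insert p.1 p.2)
          PySem.Dict.empty :=
    pv_foldl_nested groups.items (fun kv => pvCollapse kv.2)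
      (fun a k v => if a.contains k then a else a.insert k v) PySem.Dict.empty
  have hflat : inv2.items.flatMap (fun kv => kv.2.map (fun k => (k, kv.1)))
      = groups.items.flatMap (fun kv => (pvCollapse kv.2).map (fun k => (k, kv.1))) := by
    rw [hinv2, List.flatMap_map]
  have hnd3 : (pvInvert inv2).keys.Nodup := by
    rw [h3]
    exact pv_inv_nodup _ _ PySem.Dict.nodup_keys_empty
  have hemit := pv_emit_eq_invert
    (inv2.items.flatMap (fun kv => kv.2.map (fun k => (k, kv.1))))
    PySem.Dict.empty PySem.Dict.empty PySem.Dict.nodup_keys_empty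
    (by simp [PySem.Dict.empty]) (by simp [PySem.Dict.empty])
  have hA : (PySem.Dict.ofList ((pvInvert inv2).items.map
      (fun kv => (kv.1, PySem.List.pyGetD kv.2 0 "")))).items
      = (pvInvert inv2).items.map (fun kv => (kv.1, PySem.List.pyGetD kv.2 0 "")) := by
    apply pv_ofList_items
    have : (((pvInvert inv2).items.map (fun kv => (kv.1, PySem.List.pyGetD kv.2 0 ""))).map Prod.fst)
        = (pvInvert inv2).keys := by
      simp [PySem.Dict.keys, List.map_map, Function.comp]
    rw [this]
    exact hnd3
  rw [hA, hBfold, hB, ← hflat, h3, ← hemit]
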